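-- pv_equiv track=rewrite | github.com/SysSynBio/vivarium-ecoli | ecoli/processes/engine_process.py | _get_path_net_depth
-- ===== SOURCE A (Python) =====
-- def _get_path_net_depth(path):
--     depth = 0
--     for node in path:
--         if node == '..':
--             depth -= 1
--         else:
--             depth += 1
--     return depth
-- ===== SOURCE B (Python) =====
-- def _get_path_net_depth(path):
--     # Divide and conquer: a leaf token contributes -1 ('..') or +1;
--     # net depth of a path is the sum of the net depths of its halves.
--     if len(path) == 0:
--         return 0
--     if len(path) == 1:
--         return -1 if path[0] == '..' else 1
--     mid = len(path) // 2
--     return _get_path_net_depth(path[:mid]) + _get_path_net_depth(path[mid:])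
-- ===== Notes on version B (the rewrite author's own statement) =====
-- stated objective: alternative
-- what changed: Replaces the stateful left-to-right +1/-1 accumulation with a divide-and-conquer recursion: a path's net depth is the sum of the net depths of its two halves, with single-token base cases.
import Mathlib
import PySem

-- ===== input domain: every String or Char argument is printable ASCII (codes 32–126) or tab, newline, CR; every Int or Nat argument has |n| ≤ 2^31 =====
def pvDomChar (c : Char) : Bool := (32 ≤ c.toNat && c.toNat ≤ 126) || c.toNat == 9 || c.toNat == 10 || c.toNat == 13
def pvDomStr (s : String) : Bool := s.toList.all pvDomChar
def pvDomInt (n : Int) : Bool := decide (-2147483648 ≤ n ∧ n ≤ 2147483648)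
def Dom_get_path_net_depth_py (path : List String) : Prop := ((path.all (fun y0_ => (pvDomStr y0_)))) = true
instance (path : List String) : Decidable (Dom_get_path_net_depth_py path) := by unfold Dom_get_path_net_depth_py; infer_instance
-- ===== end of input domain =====

-- ===== PORT A =====
def get_path_net_depth_py (path : List String) : Int :=
  path.foldl (fun depth node => if node == ".." then depth - 1 else depth + 1) 0

-- ===== PORT B =====
-- B: divide and conquer — sum of net depths of the two halves of the path.
def get_path_net_depth_py_alt : List String → Int
  | [] => 0
  | [x] => if x == ".." then -1 else 1
  | x :: y :: rest =>
      let l := x :: y :: rest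
      let mid := l.length / 2
      get_path_net_depth_py_alt (l.take mid) + get_path_net_depth_py_alt (l.drop mid)
termination_by l => l.length
decreasing_by
  · simp; omega
  · simp; omega

-- ===== PRECONDITION & SPEC =====
def Spec_get_path_net_depth_py (path : List String) (out : Int) : Prop := out = get_path_net_depth_py_alt path
instance (path : List String) (out : Int) : Decidable (Spec_get_path_net_depth_py path out) := by unfold Spec_get_path_net_depth_py; infer_instance

-- ===== CLAIM (what is proved, stated in full; the proofs are below) =====
def Claim_equal_get_path_net_depth_py : Prop := ∀ (path : List String), Dom_get_path_net_depth_py path → Spec_get_path_net_depth_py path (get_path_net_depth_py path)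

-- ===== LEMMAS AND PROOFS =====

-- ===== VERDICT (by name: the statement is the Claim_ definition above) =====
-- B computes the count-based closed form …
theorem alt_closed (l : List String) :
    get_path_net_depth_py_alt l = (l.length : Int) - 2 * (l.count ".." : Int) := by
  fun_induction get_path_net_depth_py_alt l with
  | case1 => simp
  | case2 a hb => simp_all
  | case3 a hb => simp_all
  | case4 a b c d e ih2 ih1 =>
      rw [ih1, ih2]
      have h1 : (List.take e d).length + (List.drop e d).length = d.length := by simp; omega
      have h2 : List.count ".." (List.take e d) + List.count ".." (List.drop e d)
          = List.count ".." d := by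
        rw [← List.count_append, List.take_append_drop]
      show _ = (d.length : Int) - 2 * (List.count ".." d : Int)
      push_cast [← h1, ← h2]
      ring

-- … and A's fold satisfies the same closed form.
theorem foldl_depth (path : List String) (d : Int) :
    path.foldl (fun depth node => if node == ".." then depth - 1 else depth + 1) d
      = d + (path.length : Int) - 2 * (path.count ".." : Int) := by
  induction path generalizing d with
  | nil => simp
  | cons h t ih =>
      simp only [List.foldl_cons, ih, List.count_cons]
      by_cases hb : h == ".." <;> simp [hb] <;> ring

theorem get_path_net_depth_py_spec : Claim_equal_get_path_net_depth_py := by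
  intro path _
  unfold Spec_get_path_net_depth_py get_path_net_depth_py
  rw [foldl_depth, alt_closed]; ring
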